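-- pv_equiv track=rewrite | github.com/tw-yoo/prj-vis-exp-pipeline | opsspec/runtime/executor.py | _ordered_group_names
-- ===== SOURCE A (Python) =====
-- from typing import Any, Dict, List, Optional, Tuple
--
-- def _ordered_group_names(groups: Dict[str, Any]) -> List[str]:
--     names = [n for n in list((groups or {}).keys()) if isinstance(n, str)]
--     ordered: List[str] = []
--     if "ops" in names:
--         ordered.append("ops")
--     ordered.extend(sorted([n for n in names if n.startswith("ops") and n[3:].isdigit()], key=lambda n: int(n[3:])))
--     ordered.extend(sorted([n for n in names if n not in ordered]))
--     return ordered
-- ===== SOURCE B (Python) =====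
-- from typing import Any, Dict, List
--
-- def _ordered_group_names(groups: Dict[str, Any]) -> List[str]:
--     def key(n: str):
--         if n == "ops":
--             return (0, 0, "")
--         if n.startswith("ops") and n[3:].isdigit():
--             return (1, int(n[3:]), "")
--         return (2, 0, n)
--     return sorted([n for n in list((groups or {}).keys()) if isinstance(n, str)], key=key)
-- ===== Notes on version B (the rewrite author's own statement) =====
-- stated objective: idiomatic
-- what changed: A's three-bucket build (conditional 'ops' append, a sorted numeric-suffix pass, then a sorted remainder pass filtered by membership in the list built so far) is replaced by one stable sort of the key list under a single (bucket, numeric-suffix, name) lexicographic key function.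
import Mathlib
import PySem

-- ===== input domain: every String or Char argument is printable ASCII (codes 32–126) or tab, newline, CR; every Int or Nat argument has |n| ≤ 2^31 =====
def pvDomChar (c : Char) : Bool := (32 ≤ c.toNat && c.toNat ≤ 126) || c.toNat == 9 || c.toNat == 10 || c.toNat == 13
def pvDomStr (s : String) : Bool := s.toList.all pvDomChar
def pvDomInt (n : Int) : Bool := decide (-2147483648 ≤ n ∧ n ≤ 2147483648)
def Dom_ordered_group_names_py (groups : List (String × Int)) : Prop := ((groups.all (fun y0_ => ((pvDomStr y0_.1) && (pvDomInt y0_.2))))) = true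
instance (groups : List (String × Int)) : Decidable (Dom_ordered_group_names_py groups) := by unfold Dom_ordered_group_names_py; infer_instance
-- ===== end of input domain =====

-- B replaces A's three-bucket build (conditional "ops" append + two sorted-filter passes
-- with a membership rescan) by ONE stable sort under a single (bucket, number, name) key
-- function — objective: idiomatic/simpler decomposition, same asymptotic cost.

-- ===== PORT A =====
-- A's 'isinstance(n, str)' filter is vacuous here (every key is a String by type);
-- 'groups or {}' only maps the falsy empty dict to {}, with the same keys; keys of the
-- dict = first occurrences of the key list in order = PySem.List.dedup.
-- Inside the numeric filter 'n[3:].isdigit()' holds, so 'int(n[3:])' = ofStr? is always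
-- some there; the '.getD 0' default is never taken.
def ordered_group_names_py (groups : List (String × Int)) : List String :=
  let names := PySem.List.dedup (groups.map (fun p => p.1))
  let ordered0 : List String := if names.contains "ops" then ["ops"] else []
  let ordered1 := ordered0 ++ PySem.List.sorted
      (names.filter (fun n =>
        PySem.Str.startswith n "ops" && PySem.Str.strIsdigit (PySem.Str.slice n (some 3) none)))
      (fun n => (PySem.Int.ofStr? (PySem.Str.slice n (some 3) none)).getD 0)
  let ordered2 := ordered1 ++ PySem.List.sorted
      (names.filter (fun n => !(ordered1.contains n))) (fun n => n)
  ordered2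

-- ===== PORT B =====
-- B's Python key returns the tuple (0,0,"") / (1,int(n[3:]),"") / (2,0,n): a lexicographic
-- (Int, Int, String) triple, modelled by the Lex product order.
def pvKeyRaw (n : String) : Int × Int × String :=
  if n == "ops" then (0, 0, "")
  else if PySem.Str.startswith n "ops" && PySem.Str.strIsdigit (PySem.Str.slice n (some 3) none) then
    (1, (PySem.Int.ofStr? (PySem.Str.slice n (some 3) none)).getD 0, "")
  else (2, 0, n)

-- the raw tuple, carried into the lexicographic order the Python tuple comparison uses
def pvKeyB (n : String) : Lex (Int × Lex (Int × String)) :=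
  toLex ((pvKeyRaw n).1, toLex (pvKeyRaw n).2)

def ordered_group_names_py_alt (groups : List (String × Int)) : List String :=
  PySem.List.sorted (PySem.List.dedup (groups.map (fun p => p.1))) pvKeyB

-- ===== PRECONDITION & SPEC =====
def Spec_ordered_group_names_py (groups : List (String × Int)) (out : List String) : Prop := out = ordered_group_names_py_alt groups
instance (groups : List (String × Int)) (out : List String) : Decidable (Spec_ordered_group_names_py groups out) := by unfold Spec_ordered_group_names_py; infer_instance

-- ===== CLAIM (what is proved, stated in full; the proofs are below) =====
def Claim_equal_ordered_group_names_py : Prop := ∀ (groups : List (String × Int)), Dom_ordered_group_names_py groups → Spec_ordered_group_names_py groups (ordered_group_names_py groups)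

-- ===== LEMMAS AND PROOFS =====

-- abbreviations used only by the proofs
def pvIsNum (n : String) : Bool :=
  PySem.Str.startswith n "ops" && PySem.Str.strIsdigit (PySem.Str.slice n (some 3) none)

def pvNumVal (n : String) : Int :=
  (PySem.Int.ofStr? (PySem.Str.slice n (some 3) none)).getD 0

theorem pvIsNum_ops : pvIsNum "ops" = false := by decide

theorem pvKeyB_ops : pvKeyB "ops" = toLex (0, toLex (0, "")) := by decide

theorem pvKeyB_num {n : String} (h0 : (n == "ops") = false) (h1 : pvIsNum n = true) :
    pvKeyB n = toLex (1, toLex (pvNumVal n, "")) := by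
  have h1' : (PySem.Str.startswith n "ops" &&
      PySem.Str.strIsdigit (PySem.Str.slice n (some 3) none)) = true := h1
  simp only [pvKeyB, pvKeyRaw, h0, h1', Bool.false_eq_true, if_false, if_true, pvNumVal]

theorem pvKeyB_rest {n : String} (h0 : (n == "ops") = false) (h1 : pvIsNum n = false) :
    pvKeyB n = toLex (2, toLex (0, n)) := by
  have h1' : (PySem.Str.startswith n "ops" &&
      PySem.Str.strIsdigit (PySem.Str.slice n (some 3) none)) = false := h1
  simp only [pvKeyB, pvKeyRaw, h0, h1', Bool.false_eq_true, if_false]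

-- insertBy passes unchanged through a prefix no element of which x goes before
theorem pv_insertBy_app_left {α : Type} (before : α → α → Bool) (x : α) (ys zs : List α)
    (h : ∀ y ∈ ys, before x y = false) :
    PySem.List.insertBy before x (ys ++ zs) = ys ++ PySem.List.insertBy before x zs := by
  induction ys with
  | nil => rfl
  | cons y ys ih =>
    have hy := h y (by simp)
    simp [PySem.List.insertBy, hy]
    exact ih (fun y hy => h y (by simp [hy]))

-- insertBy lands strictly before a suffix every element of which x goes before
theorem pv_insertBy_app_right {α : Type} (before : α → α → Bool) (x : α) (ys zs : List α)
    (h : ∀ z ∈ zs, before x z = true) :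
    PySem.List.insertBy before x (ys ++ zs) = PySem.List.insertBy before x ys ++ zs := by
  induction ys with
  | nil =>
    cases zs with
    | nil => rfl
    | cons z zs => simp [PySem.List.insertBy, h z (by simp)]
  | cons y ys ih =>
    by_cases hy : before x y = true
    · simp [PySem.List.insertBy, hy]
    · simp at hy
      simp [PySem.List.insertBy, hy, ih]

theorem pv_insertBy_congr {α : Type} (before before' : α → α → Bool) (x : α) (ys : List α)
    (h : ∀ y ∈ ys, before x y = before' x y) :
    PySem.List.insertBy before x ys = PySem.List.insertBy before' x ys := by
  induction ys with
  | nil => rfl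
  | cons y ys ih =>
    have hy := h y (by simp)
    by_cases hb : before x y = true
    · simp [PySem.List.insertBy, hb, hy ▸ hb]
    · simp at hb
      simp [PySem.List.insertBy, hb, hy ▸ hb]
      exact ih (fun y hy => h y (by simp [hy]))

-- two keys that compare identically on the list's elements sort it identically
theorem pv_sorted_key_congr {α κ κ' : Type} [LinearOrder κ] [LinearOrder κ']
    (xs : List α) (K : α → κ) (K' : α → κ')
    (h : ∀ a ∈ xs, ∀ b ∈ xs, (K a < K b ↔ K' a < K' b)) :
    PySem.List.sorted xs K = PySem.List.sorted xs K' := by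
  induction xs using List.reverseRecOn with
  | nil => rfl
  | append_singleton l x ih =>
    have hmem : ∀ a ∈ l, a ∈ l ++ [x] := fun a ha => by simp [ha]
    have ihl := ih (fun a ha b hb => h a (hmem a ha) b (hmem b hb))
    rw [PySem.List.sorted_eq_foldl_insertBy, PySem.List.sorted_eq_foldl_insertBy,
      List.foldl_append, List.foldl_append]
    simp only [List.foldl_cons, List.foldl_nil]
    rw [← PySem.List.sorted_eq_foldl_insertBy, ← PySem.List.sorted_eq_foldl_insertBy, ← ihl]
    apply pv_insertBy_congr
    intro y hy
    have hyl : y ∈ l := (PySem.List.mem_sorted l K false y).mp hy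
    by_cases hlt : K x < K y
    · have h' := (h x (by simp) y (hmem y hyl)).mp hlt
      simp [hlt, h']
    · have hlt' : ¬ K' x < K' y := fun c => hlt ((h x (by simp) y (hmem y hyl)).mpr c)
      simp [hlt, hlt']

-- a stable sort under a key whose first lexicographic component is a three-way bucket
-- splits into the three sorted buckets
theorem pv_sorted_split3 {α κ : Type} [LinearOrder κ]
    (K : α → κ) (Q0 Q1 Q2 : α → Bool)
    (hcover : ∀ a, Q0 a = true ∨ Q1 a = true ∨ Q2 a = true)
    (hd01 : ∀ a, Q0 a = true → Q1 a = false) (hd02 : ∀ a, Q0 a = true → Q2 a = false)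
    (hd12 : ∀ a, Q1 a = true → Q2 a = false) (hd10 : ∀ a, Q1 a = true → Q0 a = false)
    (hd20 : ∀ a, Q2 a = true → Q0 a = false) (hd21 : ∀ a, Q2 a = true → Q1 a = false)
    (h01 : ∀ a b, Q0 a = true → Q1 b = true → K a < K b)
    (h02 : ∀ a b, Q0 a = true → Q2 b = true → K a < K b)
    (h12 : ∀ a b, Q1 a = true → Q2 b = true → K a < K b) :
    ∀ xs : List α, PySem.List.sorted xs K =
      PySem.List.sorted (xs.filter Q0) K ++ PySem.List.sorted (xs.filter Q1) K ++
        PySem.List.sorted (xs.filter Q2) K := by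
  intro xs
  induction xs using List.reverseRecOn with
  | nil => rfl
  | append_singleton l x ih =>
    have cmem : ∀ (Q : α → Bool) (y : α), y ∈ PySem.List.sorted (l.filter Q) K false →
        Q y = true := by
      intro Q y hy
      exact (List.mem_filter.mp ((PySem.List.mem_sorted _ _ _ _).mp hy)).2
    have step : ∀ m : List α, PySem.List.sorted (m ++ [x]) K =
        PySem.List.insertBy (fun a b => decide (K a < K b)) x (PySem.List.sorted m K) := by
      intro m
      rw [PySem.List.sorted_eq_foldl_insertBy, PySem.List.sorted_eq_foldl_insertBy,
        List.foldl_append]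
      simp
    rw [step, ih, List.filter_append, List.filter_append, List.filter_append]
    rcases hcover x with hx | hx | hx
    · -- bucket 0: goes into the first block
      have h1 : Q1 x = false := hd01 x hx
      have h2 : Q2 x = false := hd02 x hx
      rw [List.append_assoc]
      rw [pv_insertBy_app_right _ _ _ _ (by
        intro z hz
        rcases List.mem_append.mp hz with hz | hz
        · exact decide_eq_true (h01 x z hx (cmem Q1 z hz))
        · exact decide_eq_true (h02 x z hx (cmem Q2 z hz)))]
      rw [← step]
      simp [hx, h1, h2, List.append_assoc]
    · -- bucket 1: passes the first block, goes before the third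
      have h0 : Q0 x = false := hd10 x hx
      have h2 : Q2 x = false := hd12 x hx
      rw [List.append_assoc]
      rw [pv_insertBy_app_left _ _ _ _ (by
        intro y hy
        have := h01 y x (cmem Q0 y hy) hx
        exact decide_eq_false (lt_asymm this))]
      rw [pv_insertBy_app_right _ _ _ _ (by
        intro z hz
        exact decide_eq_true (h12 x z hx (cmem Q2 z hz)))]
      rw [← step]
      simp [hx, h0, h2, List.append_assoc]
    · -- bucket 2: passes the first two blocks
      have h0 : Q0 x = false := hd20 x hx
      have h1 : Q1 x = false := hd21 x hx
      rw [pv_insertBy_app_left _ _ _ _ (by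
        intro y hy
        rcases List.mem_append.mp hy with hy | hy
        · exact decide_eq_false (lt_asymm (h02 y x (cmem Q0 y hy) hx))
        · exact decide_eq_false (lt_asymm (h12 y x (cmem Q1 y hy) hx)))]
      rw [← step]
      simp [hx, h0, h1]

-- in a duplicate-free list the "ops" bucket is the conditional singleton A appends
theorem pv_filter_beq_singleton {α : Type} [DecidableEq α] (a : α) :
    ∀ xs : List α, xs.Nodup →
      xs.filter (fun n => n == a) = if xs.contains a then [a] else [] := by
  intro xs
  induction xs with
  | nil => simp
  | cons x xs ih =>
    intro hnd
    rcases List.nodup_cons.mp hnd with ⟨hx, hnd'⟩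
    by_cases hxa : x = a
    · subst hxa
      have : xs.filter (fun n => n == x) = [] :=
        List.filter_eq_nil_iff.mpr (by intro b hb hba; exact hx ((beq_iff_eq ..).mp hba ▸ hb))
      simp [this]
    · simp [hxa, ih hnd', Ne.symm hxa]

-- the three buckets, as Bool predicates on names
def pvQ0 (n : String) : Bool := n == "ops"
def pvQ1 (n : String) : Bool := !(n == "ops") && pvIsNum n
def pvQ2 (n : String) : Bool := !(n == "ops") && !(pvIsNum n)

theorem pv_split_B (ns : List String) :
    PySem.List.sorted ns pvKeyB =
      PySem.List.sorted (ns.filter pvQ0) pvKeyB ++ PySem.List.sorted (ns.filter pvQ1) pvKeyB ++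
        PySem.List.sorted (ns.filter pvQ2) pvKeyB := by
  have key0 : ∀ a, pvQ0 a = true → pvKeyB a = toLex (0, toLex (0, "")) := by
    intro a ha
    have : a = "ops" := by simpa [pvQ0] using ha
    simp [this, pvKeyB_ops]
  have key1 : ∀ a, pvQ1 a = true → pvKeyB a = toLex (1, toLex (pvNumVal a, "")) := by
    intro a ha
    simp [pvQ1] at ha
    exact pvKeyB_num (by simp [ha.1]) ha.2
  have key2 : ∀ a, pvQ2 a = true → pvKeyB a = toLex (2, toLex (0, a)) := by
    intro a ha
    simp [pvQ2] at ha
    exact pvKeyB_rest (by simp [ha.1]) (by simp [ha.2])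
  refine pv_sorted_split3 pvKeyB pvQ0 pvQ1 pvQ2 ?_ ?_ ?_ ?_ ?_ ?_ ?_ ?_ ?_ ?_ ns
  · intro a
    by_cases h : (a == "ops") = true
    · exact Or.inl h
    · by_cases h' : pvIsNum a = true
      · refine Or.inr (Or.inl ?_)
        simp [pvQ1, h']
        simpa using h
      · refine Or.inr (Or.inr ?_)
        simp [pvQ2, h']
        simpa using h
  · intro a ha; simp [pvQ0] at ha; simp [pvQ1, ha]
  · intro a ha; simp [pvQ0] at ha; simp [pvQ2, ha]
  · intro a ha; simp [pvQ1] at ha; simp [pvQ2, ha.2]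
  · intro a ha; simp [pvQ1] at ha; simp [pvQ0, ha.1]
  · intro a ha; simp [pvQ2] at ha; simp [pvQ0, ha.1]
  · intro a ha; simp [pvQ2] at ha; simp [pvQ1, ha.2]
  · intro a b ha hb; rw [key0 a ha, key1 b hb]; simp [Prod.Lex.toLex_lt_toLex]
  · intro a b ha hb; rw [key0 a ha, key2 b hb]; simp [Prod.Lex.toLex_lt_toLex]
  · intro a b ha hb; rw [key1 a ha, key2 b hb]; simp [Prod.Lex.toLex_lt_toLex]

-- ===== VERDICT (by name: the statement is the Claim_ definition above) =====
theorem ordered_group_names_py_spec : Claim_equal_ordered_group_names_py := by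
  intro groups _
  unfold Spec_ordered_group_names_py ordered_group_names_py ordered_group_names_py_alt
  set ns := PySem.List.dedup (groups.map (fun p => p.1)) with hns
  have hnd : ns.Nodup := PySem.List.nodup_dedup _
  -- bucket 0 block = A's conditional ["ops"]
  have hQ0 : PySem.List.sorted (ns.filter pvQ0) pvKeyB =
      (if ns.contains "ops" then ["ops"] else []) := by
    rw [show ns.filter pvQ0 = ns.filter (fun n => n == "ops") from rfl,
      pv_filter_beq_singleton "ops" ns hnd]
    by_cases h : ns.contains "ops" = true
    · rw [if_pos h]; rfl
    · rw [if_neg h]; rfl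
  -- bucket 1 block = A's numeric sorted block
  have hf1 : ns.filter pvQ1 = ns.filter pvIsNum := by
    apply List.filter_congr
    intro n _
    by_cases h : (n == "ops") = true
    · have : n = "ops" := by simpa using h
      simp [pvQ1, this, pvIsNum_ops]
    · simp at h
      simp [pvQ1, h]
  have hQ1 : PySem.List.sorted (ns.filter pvQ1) pvKeyB =
      PySem.List.sorted (ns.filter pvIsNum) (fun n => pvNumVal n) := by
    rw [hf1]
    apply pv_sorted_key_congr
    intro a ha b hb
    have ha' := (List.mem_filter.mp ha).2
    have hb' := (List.mem_filter.mp hb).2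
    have hao : (a == "ops") = false := by
      by_contra h
      simp at h
      rw [h] at ha'; exact absurd ha' (by simp [pvIsNum_ops])
    have hbo : (b == "ops") = false := by
      by_contra h
      simp at h
      rw [h] at hb'; exact absurd hb' (by simp [pvIsNum_ops])
    rw [pvKeyB_num hao ha', pvKeyB_num hbo hb']
    simp [Prod.Lex.toLex_lt_toLex]
  -- bucket 2 block = A's remainder block
  have hmemnum : ∀ n, (n ∈ PySem.List.sorted (ns.filter pvIsNum) (fun n => pvNumVal n) false) ↔
      (n ∈ ns ∧ pvIsNum n = true) := by
    intro n
    rw [PySem.List.mem_sorted, List.mem_filter]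
  have hf2 : ns.filter (fun n =>
      !((if ns.contains "ops" then ["ops"] else []) ++
          PySem.List.sorted (ns.filter pvIsNum) (fun n => pvNumVal n)).contains n) =
      ns.filter pvQ2 := by
    apply List.filter_congr
    intro n hn
    by_cases h : n = "ops"
    · subst h
      have hc : ns.contains "ops" = true := List.contains_iff_mem.mpr hn
      have hm : ((if ns.contains "ops" then ["ops"] else []) ++
          PySem.List.sorted (ns.filter pvIsNum) (fun n => pvNumVal n)).contains "ops" = true :=
        List.contains_iff_mem.mpr (by rw [if_pos hc]; simp)
      rw [hm]
      simp [pvQ2]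
    · have hm : ((if ns.contains "ops" then ["ops"] else []) ++
          PySem.List.sorted (ns.filter pvIsNum) (fun n => pvNumVal n)).contains n
          = pvIsNum n := by
        by_cases hb : pvIsNum n = true
        · rw [hb]
          exact List.contains_iff_mem.mpr (List.mem_append.mpr (Or.inr ((hmemnum n).mpr ⟨hn, hb⟩)))
        · simp only [Bool.not_eq_true] at hb
          rw [hb]
          by_contra hcc
          simp only [Bool.not_eq_false] at hcc
          rcases List.mem_append.mp (List.contains_iff_mem.mp hcc) with hx | hx
          · by_cases hc : ns.contains "ops" = true
            · rw [if_pos hc] at hx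
              exact h (by simpa using hx)
            · rw [if_neg hc] at hx
              simp at hx
          · exact absurd ((hmemnum n).mp hx).2 (by simp [hb])
      rw [hm]
      simp [pvQ2, h]
  have hQ2 : PySem.List.sorted (ns.filter pvQ2) pvKeyB =
      PySem.List.sorted (ns.filter pvQ2) (fun n => n) := by
    apply pv_sorted_key_congr
    intro a ha b hb
    have ha' := (List.mem_filter.mp ha).2
    have hb' := (List.mem_filter.mp hb).2
    simp [pvQ2] at ha' hb'
    rw [pvKeyB_rest (by simp [ha'.1]) (by simp [ha'.2]),
      pvKeyB_rest (by simp [hb'.1]) (by simp [hb'.2])]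
    simp [Prod.Lex.toLex_lt_toLex]
  show (if ns.contains "ops" then ["ops"] else []) ++
      PySem.List.sorted (ns.filter pvIsNum) (fun n => pvNumVal n) ++
      PySem.List.sorted (ns.filter (fun n =>
        !(((if ns.contains "ops" then ["ops"] else []) ++
            PySem.List.sorted (ns.filter pvIsNum) (fun n => pvNumVal n)).contains n)))
        (fun n => n) =
    PySem.List.sorted ns pvKeyB
  rw [pv_split_B ns, hQ0, hQ1, hQ2, ← hf2]
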